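-- pv_equiv track=rewrite | github.com/AlphaVideo/FP-Projects | Projeto 1 - Labirinto/maze.py | eh_labirinto
-- ===== SOURCE A (Python) =====
-- def eh_labirinto(tup):
--     if not isinstance(tup,tuple):
--         return False
--     comp = len(tup)
--
--     #O tuplo nao pode conter listas
--     for i in tup:
--         if not isinstance(i,tuple):
--             return False
--
--     #Verif comp minimo de colunas e de linhas
--     if comp < 3:
--         return False
--
--     else:
--         if len(tup[0]) < 3:
--             return False
--
--     #Verif coerencia do tamanho das colunas
--     for i in range(comp-1):
--         if len(tup[i]) != len(tup[i+1]):
--             return False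
--
--     #Verif das paredes essenciais
--     #Verif das extremidades de cima e de baixo
--     for i in (0,comp-1):
--         for e in range(len(tup[i])):
--
--             if tup[i][e] != 1:
--                 return False
--
--     #Verif das extremidades laterais
--     for i in range(comp):
--         for e in (0,len(tup[i])-1):
--
--             if tup[i][e] != 1:
--                 return False
--
--     #Verif da validade dos elementos do tuplo em geral
--     for i in range(comp):
--         for e in range(len(tup[i])):
--
--             if not isinstance(tup[i][e],int):
--                 return False
--
--             if not (tup[i][e] == 1 or tup[i][e] == 0):
--                 return False
--
--     return True
-- ===== SOURCE B (Python) =====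
-- def eh_labirinto(tup):
--     # single-pass rewrite: guards first, then one traversal of all cells
--     if not isinstance(tup, tuple):
--         return False
--     if not all(isinstance(r, tuple) for r in tup):
--         return False
--     if len(tup) < 3 or len(tup[0]) < 3:
--         return False
--     w = len(tup[0])
--     if any(len(r) != w for r in tup):
--         return False
--     h = len(tup)
--     for i, row in enumerate(tup):
--         for e, val in enumerate(row):
--             if not isinstance(val, int) or val not in (0, 1):
--                 return False
--             if (i == 0 or i == h - 1 or e == 0 or e == w - 1) and val != 1:
--                 return False
--     return True
-- ===== Notes on version B (the rewrite author's own statement) =====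
-- stated objective: simpler
-- what changed: Replaces A's three separate grid scans (top/bottom rows, side columns, all-cell 0/1 check) and its adjacent-pair length-consistency loop by an equal-to-first-row width guard plus ONE enumerate traversal of every cell that checks 0/1 validity and the border==1 condition together.
import Mathlib
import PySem

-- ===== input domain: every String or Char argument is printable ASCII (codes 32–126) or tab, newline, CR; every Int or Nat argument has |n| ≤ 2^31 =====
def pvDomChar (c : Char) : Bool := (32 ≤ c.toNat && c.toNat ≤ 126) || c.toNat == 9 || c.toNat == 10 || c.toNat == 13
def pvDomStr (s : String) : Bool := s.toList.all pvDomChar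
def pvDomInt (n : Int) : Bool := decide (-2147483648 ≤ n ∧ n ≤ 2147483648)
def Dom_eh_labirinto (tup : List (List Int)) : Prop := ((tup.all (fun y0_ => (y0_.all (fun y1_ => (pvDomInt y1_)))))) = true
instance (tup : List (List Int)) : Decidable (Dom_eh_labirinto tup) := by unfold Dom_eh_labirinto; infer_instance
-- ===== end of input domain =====

-- B differs from A only in decomposition: one cell traversal instead of three scans; same return value.

-- ===== PORT A =====
-- the isinstance(tup, tuple) / isinstance(i, tuple) / isinstance(tup[i][e], int) checks are
-- identically true on the typed domain List (List Int) and are omitted; all indices are in range,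
-- so getD with a default is exact.
def eh_labirinto (tup : List (List Int)) : Bool :=
  let comp := tup.length
  if comp < 3 then false
  else if (tup.getD 0 []).length < 3 then false
  else if (List.range (comp - 1)).any
      (fun i => !((tup.getD i []).length == (tup.getD (i+1) []).length)) then false
  else if ([0, comp - 1]).any
      (fun i => (List.range (tup.getD i []).length).any
        (fun e => !((tup.getD i []).getD e 0 == 1))) then false
  else if (List.range comp).any
      (fun i => ([0, (tup.getD i []).length - 1]).any
        (fun e => !((tup.getD i []).getD e 0 == 1))) then false
  else if (List.range comp).any
      (fun i => (List.range (tup.getD i []).length).any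
        (fun e => !((tup.getD i []).getD e 0 == 1 || (tup.getD i []).getD e 0 == 0))) then false
  else true

-- ===== PORT B =====
def eh_labirinto_alt (tup : List (List Int)) : Bool :=
  if tup.length < 3 || (tup.headD []).length < 3 then false
  else
    let w := (tup.headD []).length
    if tup.any (fun r => !(r.length == w)) then false
    else
      let h := tup.length
      (PySem.List.enumerate tup).all (fun p =>
        (PySem.List.enumerate p.2).all (fun q =>
          (q.2 == 0 || q.2 == 1) &&
          (!(p.1 == 0 || p.1 == (h : Int) - 1 || q.1 == 0 || q.1 == (w : Int) - 1) || q.2 == 1)))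

-- ===== PRECONDITION & SPEC =====
def Spec_eh_labirinto (tup : List (List Int)) (out : Bool) : Prop := out = eh_labirinto_alt tup
instance (tup : List (List Int)) (out : Bool) : Decidable (Spec_eh_labirinto tup out) := by unfold Spec_eh_labirinto; infer_instance

-- ===== CLAIM (what is proved, stated in full; the proofs are below) =====
def Claim_equal_eh_labirinto : Prop := ∀ (tup : List (List Int)), Dom_eh_labirinto tup → Spec_eh_labirinto tup (eh_labirinto tup)

-- ===== LEMMAS AND PROOFS =====

-- A's adjacent-pair length check implies B's "every row has the first row's length"
lemma chain_eq_first (tup : List (List Int))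
    (h : ∀ i < tup.length - 1, (tup[i]?.getD []).length = (tup[i+1]?.getD []).length) :
    ∀ i < tup.length, (tup[i]?.getD []).length = (tup[0]?.getD []).length := by
  intro i
  induction i with
  | zero => intro _; rfl
  | succ k ih =>
    intro hi
    have hk : k < tup.length - 1 := by omega
    rw [← h k hk]
    exact ih (by omega)

theorem eh_labirinto_spec : Claim_equal_eh_labirinto := by
  intro tup _
  unfold Spec_eh_labirinto
  rw [Bool.eq_iff_iff]
  by_cases h3 : tup.length < 3
  · simp [eh_labirinto, eh_labirinto_alt, h3]
  · by_cases hw : (tup[0]?.getD []).length < 3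
    · simp [eh_labirinto, eh_labirinto_alt, h3, hw, List.head?_eq_getElem?, List.getD]
    · simp [eh_labirinto, eh_labirinto_alt, h3, hw, List.head?_eq_getElem?, List.getD]
      have hget : ∀ k, (hk : k < tup.length) → tup[k]?.getD [] = tup[k]'hk := by
        intro k hk; simp [List.getElem?_eq_getElem hk]
      constructor
      · rintro ⟨hch, ⟨htop, hbot⟩, hside, hall⟩
        have hlen := chain_eq_first tup hch
        refine ⟨?_, ?_⟩
        · intro r hr
          obtain ⟨k, hk, rfl⟩ := List.mem_iff_getElem.mp hr
          have := hlen k hk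
          rwa [hget k hk] at this
        · intro a b hab a2 b1 hq
          rw [PySem.List.mem_enumerate_iff] at hab
          obtain ⟨k, hk, hp⟩ := hab
          cases hp
          rw [PySem.List.mem_enumerate_iff] at hq
          obtain ⟨j, hj, hq⟩ := hq
          cases hq
          have hjk : j < (tup[k]?.getD []).length := by rw [hget k hk]; exact hj
          have key : tup[k][j] = (tup[k]?.getD [])[j]?.getD 0 := by
            rw [hget k hk]; simp [List.getElem?_eq_getElem hj]
          rw [key]
          constructor
          · have hv := hall k hk j hjk
            by_cases h1 : (tup[k]?.getD [])[j]?.getD 0 = 1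
            · right; exact h1
            · left; exact hv h1
          · by_cases hb : k = 0 ∨ k = tup.length - 1 ∨ j = 0 ∨ j = (tup[0]?.getD []).length - 1
            · right
              rcases hb with rfl | rfl | rfl | hb
              · exact htop j hjk
              · exact hbot j hjk
              · exact (hside k hk).1
              · have h := (hside k hk).2
                have hl := hlen k hk
                rw [hb, ← hl]
                exact h
            · push Not at hb
              obtain ⟨hb1, hb2, hb3, hb4⟩ := hb
              left
              refine ⟨⟨⟨?_, ?_⟩, ?_⟩, ?_⟩ <;> omega
      · rintro ⟨hrows, hcell⟩
        have hlen : ∀ k, k < tup.length → (tup[k]?.getD []).length = (tup[0]?.getD []).length := by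
          intro k hk; rw [hget k hk]; exact hrows _ (List.getElem_mem _)
        have hc : ∀ k, (hk : k < tup.length) → ∀ j, j < (tup[k]?.getD []).length →
            ((tup[k]?.getD [])[j]?.getD 0 = 0 ∨ (tup[k]?.getD [])[j]?.getD 0 = 1) ∧
            ((k = 0 ∨ k = tup.length - 1 ∨ j = 0 ∨ j = (tup[0]?.getD []).length - 1) →
              (tup[k]?.getD [])[j]?.getD 0 = 1) := by
          intro k hk j hj
          have hj' : j < (tup[k]'hk).length := by rw [hget k hk] at hj; exact hj
          have key : (tup[k]?.getD [])[j]?.getD 0 = tup[k][j] := by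
            rw [hget k hk]; simp [List.getElem?_eq_getElem hj']
          have h := hcell (0 + k) (tup[k]'hk)
            (by rw [PySem.List.mem_enumerate_iff]; exact ⟨k, hk, rfl⟩)
            (0 + j) ((tup[k]'hk)[j])
            (by rw [PySem.List.mem_enumerate_iff]; exact ⟨j, hj', rfl⟩)
          rw [key]
          refine ⟨h.1, ?_⟩
          intro hb
          rcases h.2 with ⟨⟨⟨hne1, hne2⟩, hne3⟩, hne4⟩ | h1
          · exfalso; rcases hb with rfl | rfl | rfl | hb <;> omega
          · exact h1
        refine ⟨?_, ⟨?_, ?_⟩, ?_, ?_⟩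
        · intro i hi
          rw [hlen i (by omega), hlen (i + 1) (by omega)]
        · intro e he
          exact (hc 0 (by omega) e he).2 (Or.inl rfl)
        · intro e he
          exact (hc (tup.length - 1) (by omega) e he).2 (Or.inr (Or.inl rfl))
        · intro i hi
          have hli := hlen i hi
          refine ⟨(hc i hi 0 (by omega)).2 (Or.inr (Or.inr (Or.inl rfl))), ?_⟩
          exact (hc i hi ((tup[i]?.getD []).length - 1) (by omega)).2
            (Or.inr (Or.inr (Or.inr (by omega))))
        · intro i hi e he hne
          rcases (hc i hi e he).1 with h0 | h1
          · exact h0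
          · exact absurd h1 hne
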